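-- pv_equiv track=rewrite | github.com/vmarialuzm/retos-programacion-python | retos-programacion-2022/Reto #31 - AÑOS BISIESTOS/ejercicio31.py | listar_bisiestos
-- ===== SOURCE A (Python) =====
-- def listar_bisiestos(year):
--
--     lista_bisiestos = []
--
--     while True:
--
--         contador = len(lista_bisiestos)
--         year += 1
--
--         if str(year).endswith('00'):
--             if year % 400 == 0:
--                 lista_bisiestos.append(year)
--         elif year % 4 == 0:
--               lista_bisiestos.append(year)
--         elif contador == 30:
--             break
--     return lista_bisiestos
-- ===== SOURCE B (Python) =====
-- def listar_bisiestos(year):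
--     y = year + (4 - year % 4)
--     res = []
--     while len(res) < 30:
--         if y % 100 != 0 or y % 400 == 0:
--             res.append(y)
--         y += 4
--     return res
-- ===== Notes on version B (the rewrite author's own statement) =====
-- stated objective: alternative
-- what changed: B jumps straight to the next multiple of four via modular arithmetic and steps by four over leap-year candidates only, testing the century rule arithmetically, instead of A's year-by-year scan that converts every year to a string to test its last two characters and counts via a break sentinel.
import Mathlib
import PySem

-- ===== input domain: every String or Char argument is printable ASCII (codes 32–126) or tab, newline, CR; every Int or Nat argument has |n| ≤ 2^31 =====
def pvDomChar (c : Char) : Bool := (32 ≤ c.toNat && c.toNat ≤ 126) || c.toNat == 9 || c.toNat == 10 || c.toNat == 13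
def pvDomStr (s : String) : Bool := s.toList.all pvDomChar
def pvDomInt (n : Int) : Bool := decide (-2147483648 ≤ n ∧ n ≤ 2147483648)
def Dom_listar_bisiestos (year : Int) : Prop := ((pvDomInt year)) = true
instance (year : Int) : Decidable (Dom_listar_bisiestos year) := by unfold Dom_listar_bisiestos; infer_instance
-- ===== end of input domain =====

-- B enumerates only multiples of 4 (next-multiple arithmetic + step 4) instead of A's
-- year-by-year scan with a string test; equal return value proved for every Int year.

-- ===== PORT A =====
-- A's `while True` loop; the Nat argument is fuel, only there to make the recursion
-- structural: the proofs below show the loop always breaks within 241 iterations,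
-- so with fuel 300 the port computes exactly what A's loop computes.
def pvLoopA : Nat → List Int → Int → List Int
  | 0, lista, _ => lista
  | f+1, lista, year =>
    -- contador = len(lista); year += 1
    if PySem.Str.endswith (PySem.Int.toStr (year + 1)) "00" then
      if PySem.Int.mod (year + 1) 400 = 0 then pvLoopA f (lista ++ [year + 1]) (year + 1)
      else pvLoopA f lista (year + 1)
    else if PySem.Int.mod (year + 1) 4 = 0 then pvLoopA f (lista ++ [year + 1]) (year + 1)
    else if PySem.List.len lista = 30 then lista
    else pvLoopA f lista (year + 1)

def listar_bisiestos (year : Int) : List Int := pvLoopA 300 [] year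

-- ===== PORT B =====
-- B's `while len(res) < 30` loop; fuel 100 again only for structural recursion
-- (the loop runs at most 61 iterations, as the proofs below show).
def pvLoopB : Nat → List Int → Int → List Int
  | 0, res, _ => res
  | f+1, res, y =>
    if PySem.List.len res < 30 then
      if PySem.Int.mod y 100 ≠ 0 ∨ PySem.Int.mod y 400 = 0 then pvLoopB f (res ++ [y]) (y + 4)
      else pvLoopB f res (y + 4)
    else res

def listar_bisiestos_alt (year : Int) : List Int :=
  pvLoopB 100 [] (year + (4 - PySem.Int.mod year 4))

-- ===== PRECONDITION & SPEC =====
def Spec_listar_bisiestos (year : Int) (out : List Int) : Prop := out = listar_bisiestos_alt year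
instance (year : Int) (out : List Int) : Decidable (Spec_listar_bisiestos year out) := by unfold Spec_listar_bisiestos; infer_instance

-- ===== CLAIM (what is proved, stated in full; the proofs are below) =====
def Claim_equal_listar_bisiestos : Prop := ∀ (year : Int), Dom_listar_bisiestos year → Spec_listar_bisiestos year (listar_bisiestos year)

-- ===== LEMMAS AND PROOFS =====

-- Gregorian leap predicate (% is Int.emod; all divisors are positive here).
def pvIsLeap (y : Int) : Bool := decide (y % 4 = 0 ∧ (y % 100 ≠ 0 ∨ y % 400 = 0))

-- the smallest leap year strictly greater than y
def pvNext (y : Int) : Int :=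
  if pvIsLeap (y + (4 - y % 4)) then y + (4 - y % 4) else y + (4 - y % 4) + 4

-- the next n leap years strictly after y
def pvSpec : Nat → Int → List Int
  | 0, _ => []
  | n+1, y => pvNext y :: pvSpec n (pvNext y)

lemma pvIsLeap_iff (y : Int) : pvIsLeap y = true ↔ (y % 4 = 0 ∧ (y % 100 ≠ 0 ∨ y % 400 = 0)) := by
  simp [pvIsLeap]

lemma pvNext_gt (y : Int) : y < pvNext y := by
  unfold pvNext; split <;> have := Int.emod_nonneg y (by norm_num : (4:Int) ≠ 0) <;>
    have := Int.emod_lt_of_pos y (by norm_num : (0:Int) < 4) <;> omega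

lemma pvNext_le (y : Int) : pvNext y ≤ y + 8 := by
  unfold pvNext; split <;> have := Int.emod_nonneg y (by norm_num : (4:Int) ≠ 0) <;> omega

lemma pvNext_leap (y : Int) : pvIsLeap (pvNext y) = true := by
  have h0 := Int.emod_nonneg y (by norm_num : (4:Int) ≠ 0)
  have h1 := Int.emod_lt_of_pos y (by norm_num : (0:Int) < 4)
  unfold pvNext; split
  case isTrue h => exact h
  case isFalse h => simp only [pvIsLeap_iff] at h ⊢; omega

lemma pvNext_min (y w : Int) (h1 : y < w) (h2 : w < pvNext y) : pvIsLeap w = false := by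
  have h0 := Int.emod_nonneg y (by norm_num : (4:Int) ≠ 0)
  have h3 := Int.emod_lt_of_pos y (by norm_num : (0:Int) < 4)
  unfold pvNext at h2; split at h2
  case isTrue hc =>
    simp only [pvIsLeap, decide_eq_false_iff_not]; omega
  case isFalse hc =>
    simp only [pvIsLeap_iff] at hc
    simp only [pvIsLeap, decide_eq_false_iff_not]; omega

lemma pvNext_unique (y z : Int) (hz : pvIsLeap z = true) (h1 : y < z)
    (hmin : ∀ v, y < v → v < z → pvIsLeap v = false) : pvNext y = z := by
  rcases lt_trichotomy (pvNext y) z with h | h | h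
  · have := hmin (pvNext y) (pvNext_gt y) h
    rw [pvNext_leap y] at this; cases this
  · exact h
  · have := pvNext_min y z h1 h
    rw [hz] at this; cases this

lemma pvNext_between (y w : Int) (h1 : y ≤ w) (h2 : w < pvNext y) : pvNext w = pvNext y := by
  refine pvNext_unique w (pvNext y) (pvNext_leap y) h2 ?_
  intro v hv1 hv2
  exact pvNext_min y v (by omega) hv2

lemma pvSpec_congr (n : Nat) (y y' : Int) (h : pvNext y = pvNext y') :
    pvSpec n y = pvSpec n y' := by
  cases n with
  | zero => rfl
  | succ n => simp [pvSpec, h]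

-- ---- characterisation of A's string test ----

lemma pvDigitsCore_acc (f : Nat) : ∀ (n : Nat) (acc : List Char),
    Nat.toDigitsCore 10 f n acc = Nat.toDigitsCore 10 f n [] ++ acc := by
  induction f with
  | zero => intro n acc; simp [Nat.toDigitsCore]
  | succ f ih =>
    intro n acc
    simp only [Nat.toDigitsCore]
    split
    · simp
    · rw [ih (n/10) _, ih (n/10) [(n % 10).digitChar]]
      simp

lemma pvDigitsCore_fuel (n : Nat) : ∀ (f : Nat) (acc : List Char), n < f →
    Nat.toDigitsCore 10 f n acc = Nat.toDigitsCore 10 (n+1) n acc := by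
  induction n using Nat.strong_induction_on with
  | _ n ih =>
    intro f acc hf
    match f with
    | f'+1 =>
      simp only [Nat.toDigitsCore]
      split
      · rfl
      · rename_i h
        have hn : 0 < n := by
          rcases Nat.eq_zero_or_pos n with h0 | h0
          · subst h0; simp at h
          · exact h0
        have hd : n / 10 < n := Nat.div_lt_self hn (by norm_num)
        rw [ih (n/10) hd f' _ (by omega), ih (n/10) hd n _ (by omega)]

lemma pvToDigits_step (m : Nat) (h : 10 ≤ m) :
    Nat.toDigits 10 m = Nat.toDigits 10 (m / 10) ++ [Nat.digitChar (m % 10)] := by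
  unfold Nat.toDigits
  conv_lhs => simp only [Nat.toDigitsCore]
  rw [if_neg (by omega)]
  rw [pvDigitsCore_fuel (m/10) m _ (by omega)]
  rw [pvDigitsCore_acc]

lemma pvToDigits_small (m : Nat) (h : m < 10) : Nat.toDigits 10 m = [Nat.digitChar m] := by
  unfold Nat.toDigits
  simp only [Nat.toDigitsCore]
  rw [if_pos (by omega), Nat.mod_eq_of_lt h]

lemma pvDigitChar_zero (d : Nat) (h : d < 10) : Nat.digitChar d = '0' ↔ d = 0 := by
  interval_cases d <;> simp [Nat.digitChar]

lemma pvSuffix_pair (l : List Char) (a b : Char) :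
    (['0','0'] <:+ l ++ [a, b]) ↔ (a = '0' ∧ b = '0') := by
  constructor
  · intro h
    have h2 : [a, b] <:+ l ++ [a, b] := List.suffix_append l [a, b]
    rcases List.suffix_or_suffix_of_suffix h h2 with h3 | h3
    · have : ['0','0'] = [a, b] := List.IsSuffix.eq_of_length h3 (by simp)
      simp at this; tauto
    · have : [a, b] = ['0','0'] := List.IsSuffix.eq_of_length h3 (by simp)
      simp at this; tauto
  · rintro ⟨rfl, rfl⟩
    exact List.suffix_append l _

lemma pvSuffix00_nat (m : Nat) :
    (['0','0'] <:+ Nat.toDigits 10 m) ↔ (m % 100 = 0 ∧ m ≠ 0) := by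
  rcases Nat.lt_or_ge m 10 with h | h
  · rw [pvToDigits_small m h]
    constructor
    · intro hs
      have := hs.length_le
      simp at this
    · omega
  · rcases Nat.lt_or_ge m 100 with h2 | h2
    · rw [pvToDigits_step m h, pvToDigits_small (m/10) (by omega)]
      have : [Nat.digitChar (m/10)] ++ [Nat.digitChar (m%10)]
           = [] ++ [Nat.digitChar (m/10), Nat.digitChar (m%10)] := by simp
      rw [this, pvSuffix_pair]
      rw [pvDigitChar_zero (m/10) (by omega), pvDigitChar_zero (m%10) (by omega)]
      omega
    · rw [pvToDigits_step m (by omega), pvToDigits_step (m/10) (by omega),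
        List.append_assoc]
      have : [Nat.digitChar (m/10 % 10)] ++ [Nat.digitChar (m%10)]
           = [Nat.digitChar (m/10 % 10), Nat.digitChar (m%10)] := by simp
      rw [this, pvSuffix_pair]
      rw [pvDigitChar_zero (m/10 % 10) (by omega), pvDigitChar_zero (m%10) (by omega)]
      omega

lemma pvEndswith00 (y : Int) :
    PySem.Str.endswith (PySem.Int.toStr y) "00" = true ↔ (y % 100 = 0 ∧ y ≠ 0) := by
  rw [PySem.Str.endswith_eq, PySem.Int.toList_toStr]
  have h00 : ("00" : String).toList = ['0','0'] := by decide
  rw [h00]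
  unfold PySem.Chars.endswith
  rw [List.isSuffixOf_iff_suffix]
  unfold PySem.Int.toChars
  split
  · rename_i hneg
    rw [List.suffix_cons_iff]
    have hne : ¬ (['0','0'] = '-' :: Nat.toDigits 10 y.natAbs) := by
      intro h; have := List.head_eq_of_cons_eq h.symm; simp at this
    simp only [hne, false_or]
    rw [pvSuffix00_nat]
    omega
  · rw [pvSuffix00_nat]
    rename_i hp
    omega

-- ---- A's loop computes pvSpec ----

lemma pvLoopA_step (f : Nat) (lista : List Int) (y : Int) :
    pvLoopA (f+1) lista y =
      (if pvIsLeap (y + 1) then pvLoopA f (lista ++ [y + 1]) (y + 1)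
       else if (y + 1) % 4 ≠ 0 ∧ lista.length = 30 then lista
       else pvLoopA f lista (y + 1)) := by
  have hm400 : PySem.Int.mod (y+1) 400 = (y+1) % 400 := PySem.Int.mod_eq_emod_of_pos (by norm_num)
  have hm4 : PySem.Int.mod (y+1) 4 = (y+1) % 4 := PySem.Int.mod_eq_emod_of_pos (by norm_num)
  simp only [pvLoopA, hm400, hm4]
  by_cases h100 : (y+1) % 100 = 0 ∧ (y+1) ≠ 0
  · rw [if_pos ((pvEndswith00 (y+1)).mpr h100)]
    by_cases h400 : (y+1) % 400 = 0
    · rw [if_pos h400, if_pos (show pvIsLeap (y+1) = true by rw [pvIsLeap_iff]; omega)]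
    · rw [if_neg h400, if_neg (show ¬ (pvIsLeap (y+1) = true) by rw [pvIsLeap_iff]; omega),
        if_neg (show ¬ ((y+1) % 4 ≠ 0 ∧ lista.length = 30) by omega)]
  · rw [if_neg (fun hc => h100 ((pvEndswith00 (y+1)).mp hc))]
    by_cases h4 : (y+1) % 4 = 0
    · rw [if_pos h4, if_pos (show pvIsLeap (y+1) = true by rw [pvIsLeap_iff]; omega)]
    · rw [if_neg h4, if_neg (show ¬ (pvIsLeap (y+1) = true) by rw [pvIsLeap_iff]; omega)]
      by_cases hl : lista.length = 30
      · rw [if_pos (show PySem.List.len lista = 30 by rw [PySem.List.len_eq]; omega),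
          if_pos ⟨h4, hl⟩]
      · rw [if_neg (show ¬ (PySem.List.len lista = 30) by rw [PySem.List.len_eq]; omega),
          if_neg (fun hc => hl hc.2)]

lemma pvLoopA_toNext (g : Nat) : ∀ (f : Nat) (lista : List Int) (y : Int),
    lista.length < 30 → pvNext y = y + (g + 1) → g + 1 ≤ f →
    pvLoopA f lista y = pvLoopA (f - (g + 1)) (lista ++ [pvNext y]) (pvNext y) := by
  induction g with
  | zero =>
    intro f lista y hl hnext hf
    match f, hf with
    | f'+1, _ =>
      have hn1 : pvNext y = y + 1 := by omega
      have hleap : pvIsLeap (y+1) = true := by rw [← hn1]; exact pvNext_leap y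
      rw [pvLoopA_step, if_pos hleap, hn1]
      simp
  | succ g ih =>
    intro f lista y hl hnext hf
    match f, hf with
    | f'+1, _ =>
      have hnl : pvIsLeap (y+1) = false := pvNext_min y (y+1) (by omega) (by omega)
      rw [pvLoopA_step, if_neg (by simp [hnl]),
        if_neg (fun hc => absurd hc.2 (by omega))]
      have hb : pvNext (y+1) = pvNext y := pvNext_between y (y+1) (by omega) (by omega)
      have := ih f' lista (y+1) hl (by omega) (by omega)
      rw [this, hb]
      have : f' - (g + 1) = f' + 1 - (g + 1 + 1) := by omega
      rw [this]

lemma pvLoopA_main (n : Nat) : ∀ (f : Nat) (lista : List Int) (y : Int),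
    lista.length + n = 30 → (n = 30 ∨ y % 4 = 0) → 8 * n + 1 ≤ f →
    pvLoopA f lista y = lista ++ pvSpec n y := by
  induction n with
  | zero =>
    intro f lista y hlen hy hf
    have hy4 : y % 4 = 0 := by omega
    match f, hf with
    | f'+1, _ =>
      rw [pvLoopA_step, if_neg (show ¬ (pvIsLeap (y+1) = true) by rw [pvIsLeap_iff]; omega),
        if_pos ⟨by omega, by omega⟩]
      simp [pvSpec]
  | succ n ih =>
    intro f lista y hlen hy hf
    have h1 := pvNext_gt y
    have h2 := pvNext_le y
    have hg : pvNext y = y + ((pvNext y - y - 1).toNat + 1) := by omega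
    rw [pvLoopA_toNext (pvNext y - y - 1).toNat f lista y (by omega) hg (by omega)]
    have hleap := pvNext_leap y
    rw [pvIsLeap_iff] at hleap
    rw [ih _ _ (pvNext y) (by simp; omega) (Or.inr hleap.1) (by omega)]
    simp [pvSpec]

-- ---- B's loop computes pvSpec ----

lemma pvLoopB_main (n : Nat) : ∀ (f : Nat) (res : List Int) (y : Int),
    res.length + n = 30 → y % 4 = 0 → 2 * n + 1 ≤ f →
    pvLoopB f res y = res ++ pvSpec n (y - 1) := by
  induction n with
  | zero =>
    intro f res y hlen hy hf
    match f, hf with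
    | f'+1, _ =>
      simp only [pvLoopB]
      rw [if_neg (show ¬ (PySem.List.len res < 30) by rw [PySem.List.len_eq]; omega)]
      simp [pvSpec]
  | succ n ih =>
    intro f res y hlen hy hf
    match f, hf with
    | f'+1, _ =>
      have hm100 : PySem.Int.mod y 100 = y % 100 := PySem.Int.mod_eq_emod_of_pos (by norm_num)
      have hm400 : PySem.Int.mod y 400 = y % 400 := PySem.Int.mod_eq_emod_of_pos (by norm_num)
      simp only [pvLoopB, hm100, hm400]
      rw [if_pos (show PySem.List.len res < 30 by rw [PySem.List.len_eq]; omega)]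
      by_cases hleap : pvIsLeap y = true
      · rw [pvIsLeap_iff] at hleap
        rw [if_pos hleap.2]
        rw [ih f' (res ++ [y]) (y+4) (by simp; omega) (by omega) (by omega),
          show y + 4 - 1 = y + 3 by ring]
        have hny : pvNext (y-1) = y := by
          refine pvNext_unique (y-1) y (by rw [pvIsLeap_iff]; exact hleap) (by omega) ?_
          intro v h1 h2; exact absurd h2 (by omega)
        have htail : pvSpec n y = pvSpec n (y+3) := by
          refine pvSpec_congr n y (y+3) ?_
          unfold pvNext
          rw [show y + (4 - y % 4) = y + 4 by omega,
            show y + 3 + (4 - (y + 3) % 4) = y + 4 by omega]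
        simp only [pvSpec, hny, ← htail]
        simp
      · rw [pvIsLeap_iff] at hleap
        rw [if_neg (by omega)]
        match f', (by omega : 1 ≤ f') with
        | f''+1, _ =>
          have hm100' : PySem.Int.mod (y+4) 100 = (y+4) % 100 := PySem.Int.mod_eq_emod_of_pos (by norm_num)
          have hm400' : PySem.Int.mod (y+4) 400 = (y+4) % 400 := PySem.Int.mod_eq_emod_of_pos (by norm_num)
          simp only [pvLoopB, hm100', hm400']
          rw [if_pos (show PySem.List.len res < 30 by rw [PySem.List.len_eq]; omega)]
          rw [if_pos (Or.inl (by omega))]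
          rw [show y + 4 + 4 = y + 8 by ring,
            ih f'' (res ++ [y+4]) (y+8) (by simp; omega) (by omega) (by omega),
            show y + 8 - 1 = y + 7 by ring]
          have hny : pvNext (y-1) = y + 4 := by
            refine pvNext_unique (y-1) (y+4) (by rw [pvIsLeap_iff]; omega) (by omega) ?_
            intro v h1 h2
            simp only [pvIsLeap, decide_eq_false_iff_not]; omega
          have htail : pvSpec n (y+4) = pvSpec n (y+7) := by
            refine pvSpec_congr n (y+4) (y+7) ?_
            unfold pvNext
            rw [show y + 4 + (4 - (y + 4) % 4) = y + 8 by omega,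
              show y + 7 + (4 - (y + 7) % 4) = y + 8 by omega]
          simp only [pvSpec, hny, ← htail]
          simp

-- ===== VERDICT (by name: the statement is the Claim_ definition above) =====
theorem listar_bisiestos_spec : Claim_equal_listar_bisiestos := by
  intro year _
  unfold Spec_listar_bisiestos listar_bisiestos listar_bisiestos_alt
  have hA : pvLoopA 300 [] year = [] ++ pvSpec 30 year :=
    pvLoopA_main 30 300 [] year (by simp) (Or.inl rfl) (by norm_num)
  have hmod : PySem.Int.mod year 4 = year % 4 :=
    PySem.Int.mod_eq_emod_of_pos (by norm_num)
  have h4 : (year + (4 - PySem.Int.mod year 4)) % 4 = 0 := by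
    rw [hmod]; omega
  have hB : pvLoopB 100 [] (year + (4 - PySem.Int.mod year 4)) =
      [] ++ pvSpec 30 (year + (4 - PySem.Int.mod year 4) - 1) :=
    pvLoopB_main 30 100 [] _ (by simp) h4 (by norm_num)
  rw [hA, hB]
  refine congrArg _ (pvSpec_congr 30 year _ ?_)
  unfold pvNext
  rw [hmod]
  have h3 : (year + (4 - year % 4) - 1) % 4 = 3 := by omega
  have : year + (4 - year % 4) - 1 + (4 - (year + (4 - year % 4) - 1) % 4)
       = year + (4 - year % 4) := by omega
  rw [h3] at this ⊢
  rw [this]
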